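-- pv_equiv track=rewrite | github.com/isklenar/brainfuck-py | brainx_convertors/brainloller.py | convert_program_to_image
-- ===== SOURCE A (Python) =====
-- import math
--
-- def __translate_command(command):
--     """
--     Prelozi prikaz na RGB tuple.
--     :param command: prikaz
--     :return: RGB tuple
--     """
--     if command == ">":
--         return 255, 0, 0
--     elif command == "<":
--         return 128, 0, 0
--     elif command == "+":
--         return 0, 255, 0
--     elif command == "-":
--         return 0, 128, 0
--     elif command == ".":
--         return 0, 0, 255
--     elif command == ",":
--         return 0, 0, 128
--     elif command == "[":
--         return 255, 255, 0
--     elif command == "]":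
--         return 128, 128, 0
--     elif command == "R_R":
--         return 0, 255, 255
--     elif command == "R_L":
--         return 0, 128, 128
--
--     return 0, 0, 0
--
-- def __find_nearest_larger_square(number):
--     """
--     Najde neblizsi x takove, aby x**2 > arg.
--     :param number: cislo
--     :return: nejblizsi vetsi ctverec
--     """
--     return math.ceil(math.sqrt(number) + 1)
--
-- def convert_program_to_image(program):
--     """
--     Prevede program do obrazku ve variante brainloller.
--     :param program: program v brainfucku
--     :return: 2D list rgb hodnotu, sirku a vysku
--     """
--
--     n = __find_nearest_larger_square(len(program))
--     ret = [[(0, 0, 0) for x in range(n + 2)] for x in range(n)]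
--
--     for i in range(0, n, 2):  # sude radky, cteme zleva doprava
--         for j in range(n):
--             if i * n + j >= len(program):
--                 ret[i][j + 1] = __translate_command("NOP")
--             else:
--                 ret[i][j + 1] = __translate_command(program[i * n + j])
--
--     for i in range(1, n, 2):  # liche radky, cteme zprava doleva
--         for j in range(n):
--             if i * n + j >= len(program):
--                 ret[i][n - 1 - j] = __translate_command("NOP")
--             else:
--                 ret[i][n - j] = __translate_command(program[i * n + j])
--
--     for i in range(n):  # okraje jsou rotace
--         if i == 0:
--             ret[i][0] = __translate_command("NOP")
--         else:
--             ret[i][0] = __translate_command("R_L")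
--
--         ret[i][n + 1] = __translate_command("R_R")
--
--     return ret, n + 2, n
-- ===== SOURCE B (Python) =====
-- import math
--
--
-- def __translate_command(command):
--     if command == ">":
--         return 255, 0, 0
--     elif command == "<":
--         return 128, 0, 0
--     elif command == "+":
--         return 0, 255, 0
--     elif command == "-":
--         return 0, 128, 0
--     elif command == ".":
--         return 0, 0, 255
--     elif command == ",":
--         return 0, 0, 128
--     elif command == "[":
--         return 255, 255, 0
--     elif command == "]":
--         return 128, 128, 0
--     elif command == "R_R":
--         return 0, 255, 255
--     elif command == "R_L":
--         return 0, 128, 128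
--
--     return 0, 0, 0
--
--
-- def convert_program_to_image(program):
--     """Pipeline: translate the whole program to a flat pixel strip, pad it to a
--     full n*n square with black (= NOP), chunk it into rows, reverse every odd
--     row (boustrophedon), and frame each row with the border pixels."""
--     n = math.ceil(math.sqrt(len(program)) + 1)
--     pixels = [__translate_command(c) for c in program]
--     pixels += [(0, 0, 0)] * (n * n - len(program))
--     rows = [pixels[r * n:(r + 1) * n] for r in range(n)]
--     image = []
--     for r, row in enumerate(rows):
--         body = row[::-1] if r % 2 else row
--         left = (0, 0, 0) if r == 0 else __translate_command("R_L")
--         image.append([left] + body + [__translate_command("R_R")])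
--     return image, n + 2, n
-- ===== Notes on version B (the rewrite author's own statement) =====
-- stated objective: alternative
-- what changed: B is a data-flow pipeline with no per-cell index arithmetic or grid mutation: it translates the whole program into one flat pixel strip, pads it with black to a full n*n square, chunks the strip into rows, reverses every odd row, and frames each row with the border pixels; A instead mutates a pre-filled grid through three nested index loops (ret[i][j+1]/ret[i][n-j] writes). Exact because NOP translates to the black padding value.
import Mathlib
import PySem

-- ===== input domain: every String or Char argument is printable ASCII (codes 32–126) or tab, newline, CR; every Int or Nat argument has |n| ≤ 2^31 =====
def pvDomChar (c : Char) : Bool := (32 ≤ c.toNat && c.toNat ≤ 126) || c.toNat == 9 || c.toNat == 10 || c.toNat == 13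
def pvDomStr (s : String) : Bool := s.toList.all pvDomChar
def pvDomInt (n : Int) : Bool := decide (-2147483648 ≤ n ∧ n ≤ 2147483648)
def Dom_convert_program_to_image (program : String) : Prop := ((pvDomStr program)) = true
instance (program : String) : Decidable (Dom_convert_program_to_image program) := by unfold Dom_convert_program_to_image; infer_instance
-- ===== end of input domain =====

-- B is a translate→pad→chunk→reverse-odd-rows→frame pipeline over the pixel strip,
-- instead of A's three mutation loops over a pre-filled grid.

-- ===== PORT A =====

-- shared module helper __translate_command
def pvTranslateCommand (command : String) : Int × Int × Int :=
  if command = ">" then (255, 0, 0)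
  else if command = "<" then (128, 0, 0)
  else if command = "+" then (0, 255, 0)
  else if command = "-" then (0, 128, 0)
  else if command = "." then (0, 0, 255)
  else if command = "," then (0, 0, 128)
  else if command = "[" then (255, 255, 0)
  else if command = "]" then (128, 128, 0)
  else if command = "R_R" then (0, 255, 255)
  else if command = "R_L" then (0, 128, 128)
  else (0, 0, 0)

-- __find_nearest_larger_square: math.ceil(math.sqrt(number) + 1), written with integer sqrt;
-- exact for the nonnegative arguments reached here (number = len(program), far below 2^52,
-- where the correctly rounded float sqrt of a non-square is never an integer).
def pvFindNearestLargerSquare (number : Int) : Int :=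
  if Nat.sqrt number.toNat * Nat.sqrt number.toNat = number.toNat
  then (Nat.sqrt number.toNat : Int) + 1
  else (Nat.sqrt number.toNat : Int) + 2

-- program[k], total form; both ports use it only under an in-range guard
def pvCharAt (s : String) (i : Int) : Char := (PySem.Str.pyGet? s i).getD ' '

-- ret[i][j] = v  (row fetched, updated, written back)
def pvSet2 (g : List (List (Int × Int × Int))) (i j : Int) (v : Int × Int × Int) :
    List (List (Int × Int × Int)) :=
  PySem.List.pySetD g i (PySem.List.pySetD (PySem.List.pyGetD g i []) j v)

def convert_program_to_image (program : String) : (List (List (Int × Int × Int))) × Int × Int :=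
  let n := pvFindNearestLargerSquare (PySem.Str.len program)
  let ret : List (List (Int × Int × Int)) :=
    (PySem.List.pyRange 0 n 1).map (fun _ =>
      (PySem.List.pyRange 0 (n + 2) 1).map (fun _ => ((0 : Int), (0 : Int), (0 : Int))))
  let ret := (PySem.List.pyRange 0 n 2).foldl (fun ret i =>   -- even rows, left to right
    (PySem.List.pyRange 0 n 1).foldl (fun ret j =>
      if i * n + j ≥ PySem.Str.len program then
        pvSet2 ret i (j + 1) (pvTranslateCommand "NOP")
      else
        pvSet2 ret i (j + 1) (pvTranslateCommand (String.ofList [pvCharAt program (i * n + j)]))) ret) ret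
  let ret := (PySem.List.pyRange 1 n 2).foldl (fun ret i =>   -- odd rows, right to left
    (PySem.List.pyRange 0 n 1).foldl (fun ret j =>
      if i * n + j ≥ PySem.Str.len program then
        pvSet2 ret i (n - 1 - j) (pvTranslateCommand "NOP")
      else
        pvSet2 ret i (n - j) (pvTranslateCommand (String.ofList [pvCharAt program (i * n + j)]))) ret) ret
  let ret := (PySem.List.pyRange 0 n 1).foldl (fun ret i =>   -- borders
    let ret := if i = 0 then pvSet2 ret i 0 (pvTranslateCommand "NOP")
               else pvSet2 ret i 0 (pvTranslateCommand "R_L")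
    pvSet2 ret i (n + 1) (pvTranslateCommand "R_R")) ret
  (ret, n + 2, n)

-- ===== PORT B =====

def convert_program_to_image_alt (program : String) : (List (List (Int × Int × Int))) × Int × Int :=
  let n := pvFindNearestLargerSquare (PySem.Str.len program)
  let pixels : List (Int × Int × Int) :=
    program.toList.map (fun c => pvTranslateCommand (String.ofList [c]))
  let pixels := pixels ++
    PySem.List.pyRepeat [((0 : Int), (0 : Int), (0 : Int))] (n * n - PySem.Str.len program)
  let rows := (PySem.List.pyRange 0 n 1).map (fun r =>
    PySem.List.slice pixels (some (r * n)) (some ((r + 1) * n)))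
  let image := (PySem.List.enumerate rows 0).map (fun p =>
    let body := if PySem.Int.mod p.1 2 ≠ 0 then p.2.reverse else p.2   -- row[::-1] on odd rows
    let left := if p.1 = 0 then ((0 : Int), (0 : Int), (0 : Int)) else pvTranslateCommand "R_L"
    [left] ++ body ++ [pvTranslateCommand "R_R"])
  (image, n + 2, n)

-- ===== PRECONDITION & SPEC =====
def Spec_convert_program_to_image (program : String) (out : (List (List (Int × Int × Int))) × Int × Int) : Prop := out = convert_program_to_image_alt program
instance (program : String) (out : (List (List (Int × Int × Int))) × Int × Int) : Decidable (Spec_convert_program_to_image program out) := by unfold Spec_convert_program_to_image; infer_instance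

-- ===== CLAIM (what is proved, stated in full; the proofs are below) =====
def Claim_equal_convert_program_to_image : Prop := ∀ (program : String), Dom_convert_program_to_image program → Spec_convert_program_to_image program (convert_program_to_image program)

-- ===== LEMMAS AND PROOFS =====

theorem pv_tcNOP : pvTranslateCommand "NOP" = (0, 0, 0) := by decide

theorem pv_getD_set {α : Type} (l : List α) (i j : Nat) (a : α) (d : α) (hi : i < l.length) :
    (l.set i a).getD j d = if i = j then a else l.getD j d := by
  simp only [List.getD_eq_getElem?_getD, List.getElem?_set]
  split <;> simp_all

theorem pv_length_foldl {α β : Type} (l : List β) (f : List α → β → List α) (r : List α)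
    (h : ∀ acc x, (f acc x).length = acc.length) : (l.foldl f r).length = r.length := by
  induction l generalizing r with
  | nil => rfl
  | cons x t ih => simp [List.foldl_cons, ih, h]

-- a loop that repeatedly writes row i equals one write of the folded row
theorem pv_foldl_set_row {α : Type} (g : List (List α)) (i : Nat)
    (step : List α → Nat → List α) (m : Nat) :
    (List.range m).foldl (fun g j => g.set i (step (g.getD i []) j)) g
      = g.set i ((List.range m).foldl step (g.getD i [])) := by
  by_cases hi : i < g.length
  · induction m with
    | zero =>
        simp only [List.range_zero, List.foldl_nil]
        rw [List.getD_eq_getElem g [] hi, List.set_getElem_self hi]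
    | succ m ih =>
        rw [List.range_succ, List.foldl_append, List.foldl_append, ih]
        simp only [List.foldl_cons, List.foldl_nil]
        rw [pv_getD_set _ i i _ _ hi, if_pos rfl, List.set_set]
  · have hg : ∀ (l : List Nat), l.foldl (fun g j => g.set i (step (g.getD i []) j)) g = g := by
      intro l
      induction l with
      | nil => rfl
      | cons x t iht =>
          rw [List.foldl_cons, List.set_eq_of_length_le (by omega : g.length ≤ i)]
          exact iht
    rw [hg, List.set_eq_of_length_le (by omega)]

-- a fold writing pairwise-distinct rows: untouched rows keep their value …
theorem pv_grid_fold_getD_notmem {α : Type} (idx : Nat → Nat) (F : Nat → List α → List α)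
    (g : List (List α)) (M r : Nat) (hr : ∀ k < M, idx k ≠ r) :
    ((List.range M).foldl (fun g k => g.set (idx k) (F k (g.getD (idx k) []))) g).getD r []
      = g.getD r [] := by
  induction M with
  | zero => simp
  | succ M ih =>
      rw [List.range_succ, List.foldl_append]
      simp only [List.foldl_cons, List.foldl_nil]
      rw [List.getD_eq_getElem?_getD, List.getElem?_set]
      rw [if_neg (hr M (by omega))]
      rw [← List.getD_eq_getElem?_getD]
      exact ih (fun k hk => hr k (by omega))

theorem pv_grid_fold_length {α : Type} (idx : Nat → Nat) (F : Nat → List α → List α)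
    (g : List (List α)) (M : Nat) :
    ((List.range M).foldl (fun g k => g.set (idx k) (F k (g.getD (idx k) []))) g).length
      = g.length := by
  exact pv_length_foldl _ _ _ (fun acc x => by simp)

-- … and row idx k becomes F k of its old value
theorem pv_grid_fold_getD_mem {α : Type} (idx : Nat → Nat) (F : Nat → List α → List α)
    (g : List (List α)) (M k : Nat) (hk : k < M)
    (hinj : ∀ k1 k2, idx k1 = idx k2 → k1 = k2) (hlt : ∀ k' < M, idx k' < g.length) :
    ((List.range M).foldl (fun g k => g.set (idx k) (F k (g.getD (idx k) []))) g).getD (idx k) []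
      = F k (g.getD (idx k) []) := by
  induction M with
  | zero => omega
  | succ M ih =>
      rw [List.range_succ, List.foldl_append]
      simp only [List.foldl_cons, List.foldl_nil]
      by_cases hkM : k = M
      · subst hkM
        rw [pv_getD_set _ _ _ _ _ (by rw [pv_grid_fold_length]; exact hlt k (by omega)), if_pos rfl]
        rw [pv_grid_fold_getD_notmem idx F g k (idx k)
          (fun k' hk' h => by have := hinj k' k h; omega)]
      · rw [pv_getD_set _ _ _ _ _ (by rw [pv_grid_fold_length]; exact hlt M (by omega))]
        rw [if_neg (fun h => hkM (hinj M k h).symm)]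
        exact ih (by omega) (fun k' hk' => hlt k' (by omega))

-- even-row loop on a row: positions 1..m get v 0 .. v (m-1)
theorem pv_rowE_getD {α : Type} (v : Nat → α) (r : List α) (d : α) (m c : Nat)
    (hm : m + 1 ≤ r.length) :
    ((List.range m).foldl (fun r j => r.set (j + 1) (v j)) r).getD c d
      = if 1 ≤ c ∧ c < m + 1 then v (c - 1) else r.getD c d := by
  induction m with
  | zero =>
      simp only [List.range_zero, List.foldl_nil]
      rw [if_neg (by omega)]
  | succ m ih =>
      rw [List.range_succ, List.foldl_append]
      simp only [List.foldl_cons, List.foldl_nil]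
      have hlen : ((List.range m).foldl (fun r j => r.set (j + 1) (v j)) r).length = r.length :=
        pv_length_foldl _ _ _ (fun acc x => by simp)
      rw [pv_getD_set _ _ _ _ _ (by omega)]
      by_cases hc : m + 1 = c
      · subst hc
        rw [if_pos rfl, if_pos (by omega)]
        simp
      · rw [if_neg hc, ih (by omega)]
        by_cases h1 : 1 ≤ c ∧ c < m + 1
        · rw [if_pos h1, if_pos ⟨h1.1, by omega⟩]
        · rw [if_neg h1, if_neg (by omega)]

-- odd-row loop on an all-b row: position n-j gets w j where in range, the b-writes are invisible
theorem pv_rowO_getD {α : Type} (w : Nat → α) (b : α) (r : List α) (n i L : Nat)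
    (hlen : r.length = n + 2) (hb : ∀ c, r.getD c b = b) (m c : Nat) (hm : m ≤ n) :
    ((List.range m).foldl
        (fun r j => if L ≤ i * n + j then r.set (n - 1 - j) b else r.set (n - j) (w j)) r).getD c b
      = if n + 1 - m ≤ c ∧ c ≤ n ∧ i * n + (n - c) < L then w (n - c) else b := by
  induction m with
  | zero =>
      simp only [List.range_zero, List.foldl_nil]
      rw [if_neg (by omega), hb]
  | succ m ih =>
      rw [List.range_succ, List.foldl_append]
      simp only [List.foldl_cons, List.foldl_nil]
      have hlen' : ((List.range m).foldl
          (fun r j => if L ≤ i * n + j then r.set (n - 1 - j) b else r.set (n - j) (w j)) r).length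
          = r.length := by
        refine pv_length_foldl _ _ _ (fun acc x => ?_)
        split <;> simp
      by_cases hL : L ≤ i * n + m
      · rw [if_pos hL, pv_getD_set _ _ _ _ _ (by omega)]
        by_cases hc : n - 1 - m = c
        · rw [if_pos hc, if_neg (by omega)]
        · rw [if_neg hc, ih (by omega)]
          split_ifs with h1 h2 <;> first | rfl | omega
      · rw [if_neg hL, pv_getD_set _ _ _ _ _ (by omega)]
        by_cases hc : n - m = c
        · have hcond : n + 1 - (m + 1) ≤ c ∧ c ≤ n ∧ i * n + (n - c) < L := by
            refine ⟨by omega, by omega, ?_⟩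
            rw [show n - c = m by omega]; omega
          rw [if_pos hc, if_pos hcond, show n - c = m by omega]
        · rw [if_neg hc, ih (by omega)]
          split_ifs with h1 h2 <;> first | rfl | omega

-- proof-side abbreviations: the common shape both ports are reduced to
def pvN (program : String) : Nat :=
  if Nat.sqrt program.toList.length * Nat.sqrt program.toList.length = program.toList.length
  then Nat.sqrt program.toList.length + 1 else Nat.sqrt program.toList.length + 2

def pvW (program : String) (k : Nat) : Int × Int × Int :=
  pvTranslateCommand (String.ofList [pvCharAt program (k : Int)])

def pvPix (program : String) (N i c : Nat) : Int × Int × Int :=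
  if i * N + (if i % 2 = 0 then c else N - 1 - c) < program.toList.length
  then pvW program (i * N + (if i % 2 = 0 then c else N - 1 - c)) else (0, 0, 0)

def pvRowB (program : String) (N i : Nat) : List (Int × Int × Int) :=
  (if i = 0 then (0, 0, 0) else pvTranslateCommand "R_L")
    :: ((List.range N).map (fun c => pvPix program N i c) ++ [pvTranslateCommand "R_R"])

def pvGrid (program : String) (N : Nat) : List (List (Int × Int × Int)) :=
  (List.range N).map (pvRowB program N)

theorem pv_N_pos (program : String) : 1 ≤ pvN program := by
  unfold pvN; split <;> omega

theorem pv_L_lt_NN (program : String) : program.toList.length < pvN program * pvN program := by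
  have h := Nat.lt_succ_sqrt program.toList.length
  have h1 : Nat.sqrt program.toList.length + 1 ≤ pvN program := by unfold pvN; split <;> omega
  calc program.toList.length
      < (Nat.sqrt program.toList.length + 1) * (Nat.sqrt program.toList.length + 1) := h
    _ ≤ pvN program * pvN program := Nat.mul_le_mul h1 h1

theorem pv_n_eq (program : String) :
    pvFindNearestLargerSquare ((program.toList.length : Nat) : Int) = ((pvN program : Nat) : Int) := by
  unfold pvFindNearestLargerSquare pvN
  simp only [Int.toNat_natCast]
  split <;> push_cast <;> ring

theorem pv_set2_natCast (g : List (List (Int × Int × Int))) (i j : Nat) (v : Int × Int × Int) :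
    pvSet2 g (i : Int) (j : Int) v = g.set i ((g.getD i []).set j v) := by
  simp [pvSet2]

def pvBlackRow (N : Nat) : List (Int × Int × Int) :=
  (List.range (N + 2)).map (fun _ => ((0 : Int), (0 : Int), (0 : Int)))

def pvVE (program : String) (N i j : Nat) : Int × Int × Int :=
  if program.toList.length ≤ i * N + j then (0, 0, 0) else pvW program (i * N + j)

def pvStepE (program : String) (N i : Nat) : List (Int × Int × Int) → Nat → List (Int × Int × Int) :=
  fun row j => row.set (j + 1) (pvVE program N i j)

def pvFE (program : String) (N i : Nat) (row : List (Int × Int × Int)) : List (Int × Int × Int) :=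
  (List.range N).foldl (pvStepE program N i) row

def pvStepO (program : String) (N i : Nat) : List (Int × Int × Int) → Nat → List (Int × Int × Int) :=
  fun row j => if program.toList.length ≤ i * N + j then row.set (N - 1 - j) (0, 0, 0)
               else row.set (N - j) (pvW program (i * N + j))

def pvFO (program : String) (N i : Nat) (row : List (Int × Int × Int)) : List (Int × Int × Int) :=
  (List.range N).foldl (pvStepO program N i) row

theorem pv_blackRow_getD (N c : Nat) : (pvBlackRow N).getD c (0, 0, 0) = (0, 0, 0) := by
  unfold pvBlackRow
  rw [List.getD_eq_getElem?_getD]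
  rcases h : ((List.range (N + 2)).map
      (fun _ => ((0 : Int), (0 : Int), (0 : Int))))[c]? with _ | x
  · rfl
  · have := List.mem_of_getElem? h
    simp at this
    simp [this]

theorem pv_blackRow_length (N : Nat) : (pvBlackRow N).length = N + 2 := by
  simp [pvBlackRow]

theorem pv_len_FE (program : String) (N i : Nat) (row : List (Int × Int × Int)) :
    (pvFE program N i row).length = row.length := by
  refine pv_length_foldl _ _ _ (fun acc x => ?_)
  simp [pvStepE]

theorem pv_len_FO (program : String) (N i : Nat) (row : List (Int × Int × Int)) :
    (pvFO program N i row).length = row.length := by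
  refine pv_length_foldl _ _ _ (fun acc x => ?_)
  unfold pvStepO
  split <;> simp

theorem pv_set2_set2 (g : List (List (Int × Int × Int))) (k q : Nat) (x y : Int × Int × Int) :
    pvSet2 (pvSet2 g (k : Int) 0 x) (k : Int) (q : Int) y
      = g.set k (((g.getD k []).set 0 x).set q y) := by
  have h0 : pvSet2 g (k : Int) 0 x = g.set k ((g.getD k []).set 0 x) := by
    have := pv_set2_natCast g k 0 x
    simpa using this
  by_cases hk : k < g.length
  · rw [h0, pv_set2_natCast, pv_getD_set _ _ _ _ _ (by simpa using hk), if_pos rfl, List.set_set]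
  · have hg1 : g.set k ((g.getD k []).set 0 x) = g := List.set_eq_of_length_le (by omega)
    rw [h0, hg1, pv_set2_natCast, List.set_eq_of_length_le (by omega),
      List.set_eq_of_length_le (by omega)]

theorem pv_rowB_getD (program : String) (N r c : Nat) :
    (pvRowB program N r).getD c ((0 : Int), (0 : Int), (0 : Int))
      = if c = 0 then (if r = 0 then (0, 0, 0) else pvTranslateCommand "R_L")
        else if c = N + 1 then pvTranslateCommand "R_R"
        else if c ≤ N then pvPix program N r (c - 1) else (0, 0, 0) := by
  unfold pvRowB
  cases c with
  | zero => simp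
  | succ c' =>
      rw [List.getD_cons_succ, if_neg (by omega)]
      by_cases hc : c' < N
      · rw [List.getD_append _ _ _ _ (by simpa using hc)]
        rw [if_neg (by omega), if_pos (by omega)]
        rw [List.getD_eq_getElem _ _ (by simpa using hc)]
        simp
      · rw [List.getD_append_right _ _ _ _ (by simpa using hc)]
        by_cases hceq : c' = N
        · rw [if_pos (by omega)]
          subst hceq
          simp
        · rw [if_neg (by omega), if_neg (by omega)]
          rw [List.getD_eq_getElem?_getD]
          rw [List.getElem?_eq_none (by simp; omega)]
          rfl

theorem pv_map_const_getD {α : Type} (N r : Nat) (x : List α) (hr : r < N) :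
    ((List.range N).map (fun _ => x)).getD r [] = x := by
  rw [List.getD_eq_getElem _ _ (by simpa using hr)]
  simp

-- ===== B-side: the pixel strip and its chunks =====

def pvPixels (program : String) (N : Nat) : List (Int × Int × Int) :=
  program.toList.map (fun c => pvTranslateCommand (String.ofList [c]))
    ++ List.replicate (N * N - program.toList.length) ((0 : Int), (0 : Int), (0 : Int))

theorem pv_pixels_length (program : String) (N : Nat)
    (hL : program.toList.length ≤ N * N) : (pvPixels program N).length = N * N := by
  unfold pvPixels
  rw [List.length_append, List.length_map, List.length_replicate]
  omega

theorem pv_pixels_getElem (program : String) (N k : Nat)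
    (hk : k < (pvPixels program N).length) :
    (pvPixels program N)[k]
      = if k < program.toList.length then pvW program k else (0, 0, 0) := by
  unfold pvPixels at *
  by_cases h : k < program.toList.length
  · rw [List.getElem_append_left (by simpa using h), if_pos h]
    rw [List.getElem_map]
    unfold pvW pvCharAt
    rw [PySem.Str.pyGet?_natCast, List.getElem?_eq_getElem h]
    rfl
  · rw [List.getElem_append_right (by simpa using h), if_neg h, List.getElem_replicate]

-- the chunk of row r (reversed when r is odd) is exactly the interior of pvRowB
theorem pv_body_eq (program : String) (N r : Nat)
    (hL : program.toList.length < N * N) (hr : r < N) :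
    (if r % 2 ≠ 0 then (((pvPixels program N).drop (r * N)).take N).reverse
     else ((pvPixels program N).drop (r * N)).take N)
      = (List.range N).map (pvPix program N r) := by
  have hlenP : (pvPixels program N).length = N * N := pv_pixels_length program N (by omega)
  have hrN : r * N + N ≤ N * N := by
    calc r * N + N = (r + 1) * N := by ring
      _ ≤ N * N := Nat.mul_le_mul_right N (by omega)
  have hlenC : (((pvPixels program N).drop (r * N)).take N).length = N := by
    simp [hlenP]
    omega
  have hchunk : ∀ c, (hc : c < N) →
      (((pvPixels program N).drop (r * N)).take N)[c]'(by omega)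
        = (if r * N + c < program.toList.length then pvW program (r * N + c) else (0, 0, 0)) := by
    intro c hc
    rw [List.getElem_take, List.getElem_drop]
    rw [pv_pixels_getElem program N (r * N + c) (by omega)]
  by_cases hpar : r % 2 = 0
  · rw [if_neg (by omega)]
    apply List.ext_getElem
    · simp [hlenC]
    · intro c h1 h2
      rw [hlenC] at h1
      rw [hchunk c h1, List.getElem_map, List.getElem_range]
      unfold pvPix
      rw [if_pos hpar]
  · rw [if_pos hpar]
    apply List.ext_getElem
    · simp [hlenC]
    · intro c h1 h2
      simp only [List.length_reverse, hlenC] at h1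
      have h' := hchunk (N - 1 - c) (by omega)
      rw [List.getElem_reverse, List.getElem_map, List.getElem_range]
      simp only [hlenC]
      rw [h']
      unfold pvPix
      rw [if_neg hpar]

theorem pv_B_eq (program : String) :
    convert_program_to_image_alt program
      = (pvGrid program (pvN program), ((pvN program : Nat) : Int) + 2, ((pvN program : Nat) : Int)) := by
  have hN : 1 ≤ pvN program := pv_N_pos program
  have hL : program.toList.length < pvN program * pvN program := pv_L_lt_NN program
  simp only [convert_program_to_image_alt, PySem.Str.len_eq, pv_n_eq]
  refine Prod.ext ?_ rfl
  show (PySem.List.enumerate _ 0).map _ = _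
  -- the padding is List.replicate, so the strip is pvPixels
  have hpad : PySem.List.pyRepeat [((0 : Int), (0 : Int), (0 : Int))]
      (((pvN program : Nat) : Int) * ((pvN program : Nat) : Int) - ((program.toList.length : Nat) : Int))
      = List.replicate (pvN program * pvN program - program.toList.length)
          ((0 : Int), (0 : Int), (0 : Int)) := by
    rw [PySem.List.pyRepeat_singleton]
    congr 1
    rw [show ((pvN program : Nat) : Int) * ((pvN program : Nat) : Int)
        = ((pvN program * pvN program : Nat) : Int) by push_cast; ring]
    omega
  rw [hpad]
  have hpix : program.toList.map (fun c => pvTranslateCommand (String.ofList [c]))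
      ++ List.replicate (pvN program * pvN program - program.toList.length)
        ((0 : Int), (0 : Int), (0 : Int)) = pvPixels program (pvN program) := rfl
  rw [hpix, PySem.List.pyRange_zero_natCast]
  -- evaluate slices to drop/take chunks
  rw [List.map_map]
  have hchunks : (List.range (pvN program)).map
      ((fun r : Int => PySem.List.slice (pvPixels program (pvN program))
          (some (r * ((pvN program : Nat) : Int))) (some ((r + 1) * ((pvN program : Nat) : Int))))
        ∘ (fun k : Nat => (k : Int)))
      = (List.range (pvN program)).map
        (fun r : Nat => ((pvPixels program (pvN program)).drop (r * pvN program)).take (pvN program)) := by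
    apply List.map_congr_left
    intro r hr
    simp only [Function.comp]
    rw [show (r : Int) * ((pvN program : Nat) : Int) = ((r * pvN program : Nat) : Int) by
        push_cast; ring,
      show ((r : Int) + 1) * ((pvN program : Nat) : Int)
        = ((r * pvN program + pvN program : Nat) : Int) by push_cast; ring]
    rw [PySem.List.slice_natCast]
    congr 1
    omega
  rw [hchunks]
  -- now compare the enumerated map with pvGrid row by row
  apply List.ext_getElem
  · simp [pvGrid, PySem.List.length_enumerate]
  · intro r h1 h2
    have hrN : r < pvN program := by
      simp [PySem.List.length_enumerate] at h1
      exact h1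
    rw [List.getElem_map, PySem.List.getElem_enumerate]
    simp only [List.getElem_map, List.getElem_range]
    unfold pvGrid
    rw [List.getElem_map, List.getElem_range]
    have hbody := pv_body_eq program (pvN program) r hL hrN
    have hm : (PySem.Int.mod ((0 : Int) + (r : Int)) 2 ≠ 0) ↔ (r % 2 ≠ 0) := by
      rw [PySem.Int.mod_eq_emod_of_pos (by norm_num)]
      omega
    unfold pvRowB
    by_cases hpar : r % 2 = 0
    · have hbody' : ((pvPixels program (pvN program)).drop (r * pvN program)).take (pvN program)
          = (List.range (pvN program)).map (pvPix program (pvN program) r) := by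
        rw [← hbody, if_neg (by omega)]
      rw [if_neg (fun h => (hm.mp h) hpar), hbody']
      by_cases h0 : r = 0
      · rw [if_pos (by omega : (0 : Int) + (r : Int) = 0),
          List.getElem_map, List.getElem_range, if_pos h0]
        rfl
      · rw [if_neg (by omega : ¬ ((0 : Int) + (r : Int) = 0)),
          List.getElem_map, List.getElem_range, if_neg h0]
        rfl
    · have hbody' : (((pvPixels program (pvN program)).drop (r * pvN program)).take (pvN program)).reverse
          = (List.range (pvN program)).map (pvPix program (pvN program) r) := by
        rw [← hbody, if_pos (by omega)]
      rw [if_pos (hm.mpr (by omega)), hbody']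
      by_cases h0 : r = 0
      · rw [if_pos (by omega : (0 : Int) + (r : Int) = 0),
          List.getElem_map, List.getElem_range, if_pos h0]
        rfl
      · rw [if_neg (by omega : ¬ ((0 : Int) + (r : Int) = 0)),
          List.getElem_map, List.getElem_range, if_neg h0]
        rfl

theorem pv_VE_pix (program : String) (N r c : Nat) (_hN : 1 ≤ N) (h1 : 1 ≤ c) (h2 : c ≤ N) :
    (if r % 2 = 0 then pvVE program N r (c - 1)
     else if 1 ≤ c ∧ c ≤ N ∧ r * N + (N - c) < program.toList.length
          then pvW program (r * N + (N - c)) else (0, 0, 0))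
      = pvPix program N r (c - 1) := by
  unfold pvVE pvPix pvW
  by_cases hp : r % 2 = 0
  · simp only [if_pos hp]
    by_cases hL : program.toList.length ≤ r * N + (c - 1)
    · rw [if_pos hL, if_neg (by omega)]
    · rw [if_neg hL, if_pos (by omega)]
  · simp only [if_neg hp]
    rw [show N - 1 - (c - 1) = N - c by omega]
    by_cases hL : r * N + (N - c) < program.toList.length
    · rw [if_pos (⟨h1, h2, hL⟩ : 1 ≤ c ∧ c ≤ N ∧ r * N + (N - c) < program.toList.length),
        if_pos hL]
    · rw [if_neg (by omega), if_neg hL]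

theorem pv_A_eq (program : String) :
    convert_program_to_image program
      = (pvGrid program (pvN program), ((pvN program : Nat) : Int) + 2, ((pvN program : Nat) : Int)) := by
  have hN : 1 ≤ pvN program := pv_N_pos program
  simp only [convert_program_to_image, PySem.Str.len_eq, pv_n_eq]
  refine Prod.ext ?_ rfl
  show _ = pvGrid program (pvN program)
  have hr1 : PySem.List.pyRange 0 ((pvN program : Nat) : Int) 1
      = (List.range (pvN program)).map (fun k : Nat => (k : Int)) := PySem.List.pyRange_zero_natCast _
  have hr2 : PySem.List.pyRange 0 (((pvN program : Nat) : Int) + 2) 1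
      = (List.range (pvN program + 2)).map (fun k : Nat => (k : Int)) := by
    rw [show (((pvN program : Nat) : Int) + 2) = ((pvN program + 2 : Nat) : Int) by push_cast; ring]
    exact PySem.List.pyRange_zero_natCast _
  have hrE : PySem.List.pyRange 0 ((pvN program : Nat) : Int) 2
      = (List.range ((pvN program + 1) / 2)).map (fun k => ((2 * k : Nat) : Int)) := by
    rw [PySem.List.pyRange_of_pos _ _ (by norm_num)]
    rw [if_pos (by exact_mod_cast hN)]
    rw [show ((((pvN program : Nat) : Int) - 0 + 2 - 1) / 2).toNat = (pvN program + 1) / 2 by omega]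
    exact List.map_congr_left (fun k _ => by push_cast; ring)
  have hrO : PySem.List.pyRange 1 ((pvN program : Nat) : Int) 2
      = (List.range (pvN program / 2)).map (fun k => ((2 * k + 1 : Nat) : Int)) := by
    rw [PySem.List.pyRange_of_pos _ _ (by norm_num)]
    by_cases h1 : (1 : Int) < ((pvN program : Nat) : Int)
    · rw [if_pos h1]
      rw [show ((((pvN program : Nat) : Int) - 1 + 2 - 1) / 2).toNat = pvN program / 2 by omega]
      exact List.map_congr_left (fun k _ => by push_cast; ring)
    · rw [if_neg h1, show pvN program / 2 = 0 by omega]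
      simp
  rw [hr1, hr2, hrE, hrO]
  have hinit : ((List.range (pvN program)).map (fun k : Nat => (k : Int))).map
      (fun _ => ((List.range (pvN program + 2)).map (fun k : Nat => (k : Int))).map
        (fun _ => ((0 : Int), (0 : Int), (0 : Int))))
      = (List.range (pvN program)).map (fun _ => pvBlackRow (pvN program)) := by
    simp [pvBlackRow, List.map_map, Function.comp_def]
  rw [hinit, List.foldl_map, List.foldl_map, List.foldl_map]
  -- border loop in row-update form
  rw [PySem.List.foldl_congr_mem' (List.range (pvN program)) _
    (fun g k => g.set k (((g.getD k []).set 0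
        (if k = 0 then ((0 : Int), (0 : Int), (0 : Int)) else pvTranslateCommand "R_L")).set
      (pvN program + 1) (pvTranslateCommand "R_R"))) _
    (fun k hk acc => by
      simp only []
      by_cases k0 : k = 0
      · subst k0
        rw [if_pos (by norm_num), pv_tcNOP]
        rw [show (((pvN program : Nat) : Int) + 1) = ((pvN program + 1 : Nat) : Int) by push_cast; ring]
        rw [pv_set2_set2, if_pos rfl]
      · rw [if_neg (by exact_mod_cast k0)]
        rw [show (((pvN program : Nat) : Int) + 1) = ((pvN program + 1 : Nat) : Int) by push_cast; ring]
        rw [pv_set2_set2, if_neg k0])]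
  -- odd loop in row-update form
  rw [PySem.List.foldl_congr_mem' (List.range (pvN program / 2)) _
    (fun g k => g.set (2 * k + 1) (pvFO program (pvN program) (2 * k + 1) (g.getD (2 * k + 1) []))) _
    (fun k hk acc => by
      simp only []
      rw [List.foldl_map]
      rw [PySem.List.foldl_congr_mem' _ _
        (fun ret j => ret.set (2 * k + 1)
          (pvStepO program (pvN program) (2 * k + 1) (ret.getD (2 * k + 1) []) j)) _
        (fun j hj acc2 => by
          simp only [List.mem_range] at hj
          simp only []
          unfold pvStepO
          by_cases hL : program.toList.length ≤ (2 * k + 1) * pvN program + j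
          · rw [if_pos (by exact_mod_cast hL), pv_tcNOP]
            rw [show ((pvN program : Nat) : Int) - 1 - (j : Int)
                = ((pvN program - 1 - j : Nat) : Int) by omega]
            rw [pv_set2_natCast]
            rw [if_pos hL]
          · rw [if_neg (fun h => hL (by exact_mod_cast h))]
            rw [show ((2 * k + 1 : Nat) : Int) * ((pvN program : Nat) : Int) + (j : Int)
                = (((2 * k + 1) * pvN program + j : Nat) : Int) by push_cast; ring]
            rw [show ((pvN program : Nat) : Int) - (j : Int)
                = ((pvN program - j : Nat) : Int) by omega]
            rw [pv_set2_natCast]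
            rw [if_neg hL]
            rfl)]
      exact pv_foldl_set_row acc (2 * k + 1) (pvStepO program (pvN program) (2 * k + 1)) (pvN program))]
  -- even loop in row-update form
  rw [PySem.List.foldl_congr_mem' (List.range ((pvN program + 1) / 2)) _
    (fun g k => g.set (2 * k) (pvFE program (pvN program) (2 * k) (g.getD (2 * k) []))) _
    (fun k hk acc => by
      simp only []
      rw [List.foldl_map]
      rw [PySem.List.foldl_congr_mem' _ _
        (fun ret j => ret.set (2 * k)
          ((ret.getD (2 * k) []).set (j + 1) (pvVE program (pvN program) (2 * k) j))) _
        (fun j hj acc2 => by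
          simp only []
          by_cases hL : program.toList.length ≤ 2 * k * pvN program + j
          · rw [if_pos (by exact_mod_cast hL), pv_tcNOP]
            rw [show ((j : Int) + 1) = ((j + 1 : Nat) : Int) by push_cast; ring]
            rw [pv_set2_natCast]
            unfold pvVE
            rw [if_pos hL]
          · rw [if_neg (fun h => hL (by exact_mod_cast h))]
            rw [show ((2 * k : Nat) : Int) * ((pvN program : Nat) : Int) + (j : Int)
                = ((2 * k * pvN program + j : Nat) : Int) by push_cast; ring]
            rw [show ((j : Int) + 1) = ((j + 1 : Nat) : Int) by push_cast; ring]
            rw [pv_set2_natCast]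
            unfold pvVE
            rw [if_neg hL]
            rfl)]
      exact pv_foldl_set_row acc (2 * k) (pvStepE program (pvN program) (2 * k)) (pvN program))]
  -- evaluate the three grid folds pointwise
  have hlen0 : ((List.range (pvN program)).map (fun _ => pvBlackRow (pvN program))).length
      = pvN program := by simp
  have hlen1 : ((List.range ((pvN program + 1) / 2)).foldl
      (fun g k => g.set (2 * k) (pvFE program (pvN program) (2 * k) (g.getD (2 * k) [])))
      ((List.range (pvN program)).map (fun _ => pvBlackRow (pvN program)))).length
      = pvN program := by
    rw [pv_grid_fold_length (fun k => 2 * k) (fun k row => pvFE program (pvN program) (2 * k) row)]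
    exact hlen0
  have hlen2 : ((List.range (pvN program / 2)).foldl
      (fun g k => g.set (2 * k + 1) (pvFO program (pvN program) (2 * k + 1) (g.getD (2 * k + 1) [])))
      ((List.range ((pvN program + 1) / 2)).foldl
        (fun g k => g.set (2 * k) (pvFE program (pvN program) (2 * k) (g.getD (2 * k) [])))
        ((List.range (pvN program)).map (fun _ => pvBlackRow (pvN program))))).length
      = pvN program := by
    rw [pv_grid_fold_length (fun k => 2 * k + 1)
      (fun k row => pvFO program (pvN program) (2 * k + 1) row)]
    exact hlen1
  have hrow : ∀ r, r < pvN program →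
      ((List.range (pvN program)).foldl
        (fun g k => g.set k (((g.getD k []).set 0
            (if k = 0 then ((0 : Int), (0 : Int), (0 : Int)) else pvTranslateCommand "R_L")).set
          (pvN program + 1) (pvTranslateCommand "R_R")))
        ((List.range (pvN program / 2)).foldl
          (fun g k => g.set (2 * k + 1) (pvFO program (pvN program) (2 * k + 1) (g.getD (2 * k + 1) [])))
          ((List.range ((pvN program + 1) / 2)).foldl
            (fun g k => g.set (2 * k) (pvFE program (pvN program) (2 * k) (g.getD (2 * k) [])))
            ((List.range (pvN program)).map (fun _ => pvBlackRow (pvN program)))))).getD r []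
      = pvRowB program (pvN program) r := by
    intro r hr
    have hb := pv_grid_fold_getD_mem (fun k => k)
      (fun k row => (row.set 0
          (if k = 0 then ((0 : Int), (0 : Int), (0 : Int)) else pvTranslateCommand "R_L")).set
        (pvN program + 1) (pvTranslateCommand "R_R"))
      _ (pvN program) r hr (fun a b h => h) (fun k' hk' => by show k' < _; rw [hlen2]; exact hk')
    simp only [] at hb
    rw [hb]
    -- the inner row before the border loop
    have hmid : ((List.range (pvN program / 2)).foldl
        (fun g k => g.set (2 * k + 1) (pvFO program (pvN program) (2 * k + 1) (g.getD (2 * k + 1) [])))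
        ((List.range ((pvN program + 1) / 2)).foldl
          (fun g k => g.set (2 * k) (pvFE program (pvN program) (2 * k) (g.getD (2 * k) [])))
          ((List.range (pvN program)).map (fun _ => pvBlackRow (pvN program))))).getD r []
        = if r % 2 = 0 then pvFE program (pvN program) r (pvBlackRow (pvN program))
          else pvFO program (pvN program) r (pvBlackRow (pvN program)) := by
      by_cases hpar : r % 2 = 0
      · rw [if_pos hpar]
        rw [pv_grid_fold_getD_notmem (fun k => 2 * k + 1)
          (fun k row => pvFO program (pvN program) (2 * k + 1) row) _ (pvN program / 2) r
          (fun k hk h => by have h' : 2 * k + 1 = r := h; omega)]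
        have hmem := pv_grid_fold_getD_mem (fun k => 2 * k)
          (fun k row => pvFE program (pvN program) (2 * k) row)
          ((List.range (pvN program)).map (fun _ => pvBlackRow (pvN program)))
          ((pvN program + 1) / 2) (r / 2) (by omega) (fun a b h => by have h' : 2 * a = 2 * b := h; omega)
          (fun k' hk' => by show 2 * k' < _; rw [hlen0]; omega)
        simp only [] at hmem
        rw [show 2 * (r / 2) = r by omega] at hmem
        rw [hmem, pv_map_const_getD _ r _ hr]
      · rw [if_neg hpar]
        have hmem := pv_grid_fold_getD_mem (fun k => 2 * k + 1)
          (fun k row => pvFO program (pvN program) (2 * k + 1) row)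
          ((List.range ((pvN program + 1) / 2)).foldl
            (fun g k => g.set (2 * k) (pvFE program (pvN program) (2 * k) (g.getD (2 * k) [])))
            ((List.range (pvN program)).map (fun _ => pvBlackRow (pvN program))))
          (pvN program / 2) (r / 2) (by omega) (fun a b h => by have h' : 2 * a + 1 = 2 * b + 1 := h; omega)
          (fun k' hk' => by show 2 * k' + 1 < _; rw [hlen1]; omega)
        simp only [] at hmem
        rw [show 2 * (r / 2) + 1 = r by omega] at hmem
        rw [hmem]
        rw [pv_grid_fold_getD_notmem (fun k => 2 * k)
          (fun k row => pvFE program (pvN program) (2 * k) row) _ ((pvN program + 1) / 2) r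
          (fun k hk h => by have h' : 2 * k = r := h; omega)]
        rw [pv_map_const_getD _ r _ hr]
    rw [hmid]
    -- row-level comparison
    have hrowlen : (if r % 2 = 0 then pvFE program (pvN program) r (pvBlackRow (pvN program))
        else pvFO program (pvN program) r (pvBlackRow (pvN program))).length
        = pvN program + 2 := by
      split
      · rw [pv_len_FE, pv_blackRow_length]
      · rw [pv_len_FO, pv_blackRow_length]
    apply List.ext_getElem
    · simp only [List.length_set, hrowlen]
      simp [pvRowB]
    · intro c hc1 hc2
      rw [← List.getD_eq_getElem _ ((0 : Int), (0 : Int), (0 : Int)) hc1,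
        ← List.getD_eq_getElem _ ((0 : Int), (0 : Int), (0 : Int)) hc2]
      have hcN : c < pvN program + 2 := by
        simp only [List.length_set, hrowlen] at hc1
        exact hc1
      rw [pv_rowB_getD]
      rw [pv_getD_set _ _ _ _ _ (by simp only [List.length_set, hrowlen]; omega)]
      rw [pv_getD_set _ _ _ _ _ (by simp only [hrowlen]; omega)]
      by_cases hpar : r % 2 = 0
      · rw [if_pos hpar]
        unfold pvFE pvStepE
        rw [pv_rowE_getD _ _ _ _ c (by rw [pv_blackRow_length]; omega)]
        rw [pv_blackRow_getD]
        by_cases hc0 : c = 0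
        · subst hc0
          rw [if_neg (by omega), if_pos rfl, if_pos rfl]
        · by_cases hcL : c = pvN program + 1
          · subst hcL
            rw [if_pos rfl, if_neg (by omega), if_pos rfl]
          · rw [if_neg (by omega), if_neg (by omega), if_neg hc0, if_neg hcL,
              if_pos (by omega : 1 ≤ c ∧ c < pvN program + 1), if_pos (by omega : c ≤ pvN program)]
            have := pv_VE_pix program (pvN program) r c hN (by omega) (by omega)
            rw [if_pos hpar] at this
            exact this
      · rw [if_neg hpar]
        unfold pvFO pvStepO
        rw [pv_rowO_getD (fun j => pvW program (r * pvN program + j)) _ _ (pvN program) r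
          program.toList.length (pv_blackRow_length _) (pv_blackRow_getD _) (pvN program) c
          (le_refl _)]
        by_cases hc0 : c = 0
        · subst hc0
          rw [if_neg (by omega), if_pos rfl, if_pos rfl]
        · by_cases hcL : c = pvN program + 1
          · subst hcL
            rw [if_pos rfl, if_neg (by omega), if_pos rfl]
          · rw [if_neg (by omega), if_neg (by omega), if_neg hc0, if_neg hcL,
              if_pos (by omega : c ≤ pvN program)]
            have := pv_VE_pix program (pvN program) r c hN (by omega) (by omega)
            rw [if_neg hpar] at this
            rw [show pvN program + 1 - pvN program = 1 by omega]
            exact this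
  -- conclude the grid equality
  apply List.ext_getElem
  · rw [pv_grid_fold_length (fun k => k)
      (fun k row => (row.set 0
          (if k = 0 then ((0 : Int), (0 : Int), (0 : Int)) else pvTranslateCommand "R_L")).set
        (pvN program + 1) (pvTranslateCommand "R_R")), hlen2]
    simp [pvGrid]
  · intro r h1 h2
    have hrN : r < pvN program := by
      rw [pv_grid_fold_length (fun k => k)
        (fun k row => (row.set 0
            (if k = 0 then ((0 : Int), (0 : Int), (0 : Int)) else pvTranslateCommand "R_L")).set
          (pvN program + 1) (pvTranslateCommand "R_R")), hlen2] at h1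
      exact h1
    rw [← List.getD_eq_getElem _ [] h1, ← List.getD_eq_getElem _ [] h2, hrow r hrN]
    unfold pvGrid
    rw [List.getD_eq_getElem _ _ (by simpa using hrN)]
    simp

-- ports agree
theorem pv_ports_eq (program : String) :
    convert_program_to_image program = convert_program_to_image_alt program := by
  rw [pv_A_eq, pv_B_eq]

-- ===== VERDICT (by name: the statement is the Claim_ definition above) =====
theorem convert_program_to_image_spec : Claim_equal_convert_program_to_image := by
  intro program _
  unfold Spec_convert_program_to_image
  exact pv_ports_eq program
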